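-- pv_equiv track=rewrite | github.com/GenerGener/UTR_Checker | utr-checker-13.py | _find_terminal_r_regions
-- ===== SOURCE A (Python) =====
-- from typing import Tuple, Dict, List
--
-- def _find_terminal_r_regions(r_matches: List[Dict], u5_matches: List[Dict]) -> Tuple[Dict, Dict]:
--     """Find 5' and 3' R regions"""
--     five_prime_r = None
--     three_prime_r = None
--
--     # Find 5' R region (near start)
--     for match in r_matches:
--         if match['start'] < 200:
--             five_prime_r = match
--             break
--
--     # Find 3' R region (far from start)
--     threshold = 5000
--     if u5_matches:
--         threshold = u5_matches[0]['start'] + 1000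
--
--     for match in r_matches:
--         if match['start'] > threshold:
--             three_prime_r = match
--             break
--
--     return five_prime_r, three_prime_r
-- ===== SOURCE B (Python) =====
-- def _find_terminal_r_regions(r_matches, u5_matches):
--     """Find 5' and 3' R regions (single fused scan with two accumulators)."""
--     threshold = u5_matches[0]['start'] + 1000 if u5_matches else 5000
--     five_prime_r = None
--     three_prime_r = None
--     for match in r_matches:
--         s = match['start']
--         if five_prime_r is None and s < 200:
--             five_prime_r = match
--         if three_prime_r is None and s > threshold:
--             three_prime_r = match
--         if five_prime_r is not None and three_prime_r is not None:
--             break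
--     return five_prime_r, three_prime_r
-- ===== Notes on version B (the rewrite author's own statement) =====
-- stated objective: alternative
-- what changed: A makes two sequential scans of r_matches (one for the 5' region, one for the 3' region after computing the threshold in between); B computes the threshold up front and makes a single fused scan maintaining both accumulators, stopping once both are found.
import Mathlib
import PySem

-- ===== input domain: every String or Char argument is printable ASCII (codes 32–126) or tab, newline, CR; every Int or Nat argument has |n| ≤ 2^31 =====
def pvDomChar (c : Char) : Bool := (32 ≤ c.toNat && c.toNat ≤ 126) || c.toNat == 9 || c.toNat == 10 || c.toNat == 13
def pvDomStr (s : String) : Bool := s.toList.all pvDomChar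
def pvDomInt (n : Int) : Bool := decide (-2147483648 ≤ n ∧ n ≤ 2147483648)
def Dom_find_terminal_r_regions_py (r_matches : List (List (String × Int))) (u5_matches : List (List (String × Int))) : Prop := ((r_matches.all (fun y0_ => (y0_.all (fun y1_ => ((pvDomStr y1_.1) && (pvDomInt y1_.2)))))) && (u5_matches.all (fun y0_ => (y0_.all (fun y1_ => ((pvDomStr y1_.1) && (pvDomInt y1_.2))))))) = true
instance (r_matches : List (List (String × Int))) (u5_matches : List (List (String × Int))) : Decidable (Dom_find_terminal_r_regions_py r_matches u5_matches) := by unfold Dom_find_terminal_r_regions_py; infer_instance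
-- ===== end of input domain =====

-- B computes the threshold first and finds both regions in ONE fused scan with two
-- accumulators and an early break, instead of A's two sequential scans; same O(n) cost.

-- match['start'] (first binding of key "start"); inside Pre_ the key is present, so getD's
-- default is never used on any dict either program actually inspects.
def pvGetStart (m : List (String × Int)) : Int := (m.lookup "start").getD 0

-- ===== PORT A =====
-- first loop of A: first match with start < 200
def pvFindFive : List (List (String × Int)) → Option (List (String × Int))
  | [] => none
  | m :: rest => if pvGetStart m < 200 then some m else pvFindFive rest

-- second loop of A: first match with start > threshold
def pvFindThree (t : Int) : List (List (String × Int)) → Option (List (String × Int))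
  | [] => none
  | m :: rest => if pvGetStart m > t then some m else pvFindThree t rest

def find_terminal_r_regions_py (r_matches : List (List (String × Int))) (u5_matches : List (List (String × Int))) : (Option (List (String × Int))) × (Option (List (String × Int))) :=
  let five_prime_r := pvFindFive r_matches
  let threshold : Int :=
    match u5_matches with
    | [] => 5000
    | m :: _ => pvGetStart m + 1000
  let three_prime_r := pvFindThree threshold r_matches
  (five_prime_r, three_prime_r)

-- ===== PORT B =====
-- B's fused loop: carries both accumulators, breaks once both are set
def pvScan (t : Int) : Option (List (String × Int)) → Option (List (String × Int)) → List (List (String × Int)) → (Option (List (String × Int))) × (Option (List (String × Int)))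
  | five, three, [] => (five, three)
  | five, three, m :: rest =>
    let s := pvGetStart m
    let five' := if five.isNone && decide (s < 200) then some m else five
    let three' := if three.isNone && decide (s > t) then some m else three
    if five'.isSome && three'.isSome then (five', three')
    else pvScan t five' three' rest

def find_terminal_r_regions_py_alt (r_matches : List (List (String × Int))) (u5_matches : List (List (String × Int))) : (Option (List (String × Int))) × (Option (List (String × Int))) :=
  let threshold : Int :=
    match u5_matches with
    | [] => 5000
    | m :: _ => pvGetStart m + 1000
  pvScan threshold none none r_matches

-- ===== PRECONDITION & SPEC =====
-- Pre_ excludes inputs where some dict in r_matches (or the first dict of u5_matches) lacks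
-- the key 'start': Python A raises KeyError on every such dict it scans.  This is slightly
-- conservative: a keyless dict lying after both early breaks is never inspected by A, which
-- then returns; B returns the same value there (see claim.json cites).
def Pre_find_terminal_r_regions_py (r_matches : List (List (String × Int))) (u5_matches : List (List (String × Int))) : Prop :=
  (∀ m ∈ r_matches, (m.lookup "start").isSome = true) ∧
  (∀ m ∈ u5_matches.take 1, (m.lookup "start").isSome = true)
instance (r_matches : List (List (String × Int))) (u5_matches : List (List (String × Int))) : Decidable (Pre_find_terminal_r_regions_py r_matches u5_matches) := by unfold Pre_find_terminal_r_regions_py; infer_instance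

def pvWitness_find_terminal_r_regions_py : (List (List (String × Int))) × (List (List (String × Int))) :=
  ([[("start", 100)], [("start", 6000)]], [])

def Spec_find_terminal_r_regions_py (r_matches : List (List (String × Int))) (u5_matches : List (List (String × Int))) (out : (Option (List (String × Int))) × (Option (List (String × Int)))) : Prop := out = find_terminal_r_regions_py_alt r_matches u5_matches
instance (r_matches : List (List (String × Int))) (u5_matches : List (List (String × Int))) (out : (Option (List (String × Int))) × (Option (List (String × Int)))) : Decidable (Spec_find_terminal_r_regions_py r_matches u5_matches out) := by unfold Spec_find_terminal_r_regions_py; infer_instance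

-- ===== CLAIM (what is proved, stated in full; the proofs are below) =====
def Claim_equal_find_terminal_r_regions_py : Prop := ∀ (r_matches : List (List (String × Int))) (u5_matches : List (List (String × Int))), Dom_find_terminal_r_regions_py r_matches u5_matches → Pre_find_terminal_r_regions_py r_matches u5_matches → Spec_find_terminal_r_regions_py r_matches u5_matches (find_terminal_r_regions_py r_matches u5_matches)

-- ===== LEMMAS AND PROOFS =====

-- the fused scan computes exactly "accumulator, else the corresponding simple search"
theorem pvScan_eq (t : Int) : ∀ (l : List (List (String × Int))) (five three : Option (List (String × Int))),
    pvScan t five three l = (five.or (pvFindFive l), three.or (pvFindThree t l)) := by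
  intro l
  induction l with
  | nil => intro five three; simp [pvScan, pvFindFive, pvFindThree]
  | cons m rest ih =>
    intro five three
    simp only [pvScan, pvFindFive, pvFindThree]
    cases five <;> cases three <;>
      by_cases h1 : pvGetStart m < 200 <;> by_cases h2 : pvGetStart m > t <;>
      simp [ih, h1, h2, Option.or]

theorem find_terminal_r_regions_py_spec : Claim_equal_find_terminal_r_regions_py := by
  intro r u5 _ _
  unfold Spec_find_terminal_r_regions_py find_terminal_r_regions_py find_terminal_r_regions_py_alt
  rw [pvScan_eq]
  simp [Option.or]
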